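-- pv_equiv track=rewrite | github.com/Steflavoie65/Lychrel_196_Formula | scripts/verify_mod_p_obstruction.py | apply_T
-- ===== SOURCE A (Python) =====
-- def number_to_digits_lsb(n: int):
--     if n == 0:
--         return [0]
--     digs = []
--     while n > 0:
--         n, r = divmod(n, 10)
--         digs.append(r)
--     return digs
--
-- def digits_to_number(digs):
--     v = 0
--     for d in reversed(digs):
--         v = v * 10 + d
--     return v
--
-- def apply_T(n: int):
--     digs = number_to_digits_lsb(n)
--     d = len(digs)
--     res = [0] * (d + 1)
--     carries = [0] * (d + 1)
--     for i in range(d):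
--         j = d - 1 - i
--         s = digs[i] + digs[j] + carries[i]
--         res[i] = s % 10
--         carries[i + 1] = s // 10
--     L = d
--     if carries[d] > 0:
--         res[d] = carries[d]
--         L = d + 1
--     return digits_to_number(res[:L]), res[:L], carries
-- ===== SOURCE B (Python) =====
-- def number_to_digits_lsb(n: int):
--     if n == 0:
--         return [0]
--     digs = []
--     while n > 0:
--         n, r = divmod(n, 10)
--         digs.append(r)
--     return digs
--
-- def apply_T(n: int):
--     # Accumulate the exact value n + reverse(n) as one integer while walking the
--     # columns; each result digit and each carry is read off the running value by
--     # division, with no digit/carry recurrence and no final re-decoding pass.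
--     digs = number_to_digits_lsb(n)
--     d = len(digs)
--     res = []
--     carries = [0]
--     acc = 0
--     p = 1
--     for i in range(d):
--         acc += (digs[i] + digs[d - 1 - i]) * p
--         p *= 10
--         res.append(acc // (p // 10) % 10)
--         carries.append(acc // p)
--     if carries[-1] > 0:
--         res.append(carries[-1])
--     return acc, res, carries
-- ===== Notes on version B (the rewrite author's own statement) =====
-- stated objective: alternative
-- what changed: B replaces A's preallocated-array digit/carry recurrence followed by re-decoding the digit slice into a number with a single running integer acc that accumulates the exact value of n plus its reversal column by column; each result digit and each carry is read off acc by division by the current power of ten, and acc itself is returned, so there is no carry recurrence and no digits_to_number pass.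
import Mathlib
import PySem

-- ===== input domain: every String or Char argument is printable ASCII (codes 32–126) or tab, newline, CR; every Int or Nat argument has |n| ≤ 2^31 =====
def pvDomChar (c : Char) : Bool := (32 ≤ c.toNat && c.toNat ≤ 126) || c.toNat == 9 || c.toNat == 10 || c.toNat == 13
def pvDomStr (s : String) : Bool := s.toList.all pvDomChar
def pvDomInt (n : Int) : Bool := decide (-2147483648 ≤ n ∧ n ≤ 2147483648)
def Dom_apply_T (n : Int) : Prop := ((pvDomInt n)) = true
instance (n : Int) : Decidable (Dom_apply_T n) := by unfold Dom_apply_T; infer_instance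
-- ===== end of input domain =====

-- B accumulates the exact value n + reverse(n) in one running integer and reads digits and
-- carries off it by division, instead of A's array-based digit/carry recurrence plus re-decoding.

-- ===== PORT A =====
-- shared helper (defined identically in both Python files)
def numberToDigitsLsbGo (n : Int) (digs : List Int) : List Int :=
  if n > 0 then
    numberToDigitsLsbGo (PySem.Int.floordiv n 10) (digs ++ [PySem.Int.mod n 10])
  else digs
termination_by n.toNat
decreasing_by
  rw [PySem.Int.floordiv_eq_ediv_of_pos (by norm_num : (0:Int) < 10)]
  omega

def number_to_digits_lsb (n : Int) : List Int :=
  if n = 0 then [0] else numberToDigitsLsbGo n []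

def digits_to_number (digs : List Int) : Int :=
  digs.reverse.foldl (fun v dd => v * 10 + dd) 0

-- the body of A's `for i in range(d)` loop, state = (res, carries)
def applyTStep (digs : List Int) (d : Nat) (st : List Int × List Int) (i : Int) :
    List Int × List Int :=
  let j : Int := (d : Int) - 1 - i
  let s := PySem.List.pyGetD digs i 0 + PySem.List.pyGetD digs j 0 +
           PySem.List.pyGetD st.2 i 0
  (PySem.List.pySetD st.1 i (PySem.Int.mod s 10),
   PySem.List.pySetD st.2 (i + 1) (PySem.Int.floordiv s 10))

def apply_T (n : Int) : Int × List Int × List Int :=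
  let digs := number_to_digits_lsb n
  let d := digs.length
  let rc := (PySem.List.pyRange 0 (d : Int) 1).foldl (applyTStep digs d)
    (List.replicate (d + 1) 0, List.replicate (d + 1) 0)
  let res := rc.1
  let carries := rc.2
  let cd := PySem.List.pyGetD carries (d : Int) 0
  let fin : List Int × Int :=
    if cd > 0 then (PySem.List.pySetD res (d : Int) cd, (d : Int) + 1)
    else (res, (d : Int))
  let r := PySem.List.slice fin.1 none (some fin.2)
  (digits_to_number r, r, carries)

-- ===== PORT B =====
-- the body of B's loop, state = (res, carries, acc, p)
def applyTAltStep (digs : List Int) (d : Nat) (st : List Int × List Int × Int × Int)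
    (i : Int) : List Int × List Int × Int × Int :=
  let acc := st.2.2.1 + (PySem.List.pyGetD digs i 0 +
              PySem.List.pyGetD digs ((d : Int) - 1 - i) 0) * st.2.2.2
  let p := st.2.2.2 * 10
  (st.1 ++ [PySem.Int.mod (PySem.Int.floordiv acc (PySem.Int.floordiv p 10)) 10],
   st.2.1 ++ [PySem.Int.floordiv acc p], acc, p)

def apply_T_alt (n : Int) : Int × List Int × List Int :=
  let digs := number_to_digits_lsb n
  let d := digs.length
  let st := (PySem.List.pyRange 0 (d : Int) 1).foldl (applyTAltStep digs d)
    ([], [0], 0, 1)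
  let res := st.1
  let carries := st.2.1
  let acc := st.2.2.1
  let last := PySem.List.pyGetD carries (-1) 0
  if last > 0 then (acc, res ++ [last], carries) else (acc, res, carries)

-- ===== PRECONDITION & SPEC =====
def Spec_apply_T (n : Int) (out : Int × List Int × List Int) : Prop := out = apply_T_alt n
instance (n : Int) (out : Int × List Int × List Int) : Decidable (Spec_apply_T n out) := by
  unfold Spec_apply_T; infer_instance

-- ===== CLAIM (what is proved, stated in full; the proofs are below) =====
def Claim_equal_apply_T : Prop := ∀ (n : Int), Dom_apply_T n → Spec_apply_T n (apply_T n)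

-- ===== LEMMAS AND PROOFS =====

-- column sums of the digit list
def colOf (digs : List Int) (i : Nat) : Int :=
  digs.getD i 0 + digs.getD (digs.length - 1 - i) 0

-- A's carry sequence: c 0 = 0, c (k+1) = (col k + c k) // 10
def cSeq (col : Nat → Int) : Nat → Int
  | 0 => 0
  | k + 1 => PySem.Int.floordiv (col k + cSeq col k) 10

-- A's result digits
def rSeq (col : Nat → Int) (k : Nat) : Int := PySem.Int.mod (col k + cSeq col k) 10

-- B's accumulator after k columns: Σ_{i<k} col i * 10^i
def accSeq (col : Nat → Int) : Nat → Int
  | 0 => 0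
  | k + 1 => accSeq col k + col k * 10 ^ k

-- value of the first k result digits: Σ_{i<k} rSeq i * 10^i
def rVal (col : Nat → Int) : Nat → Int
  | 0 => 0
  | k + 1 => rVal col k + rSeq col k * 10 ^ k

lemma digs_nonneg_go (n : Int) (digs : List Int) :
    (∀ x ∈ digs, 0 ≤ x) → ∀ x ∈ numberToDigitsLsbGo n digs, 0 ≤ x := by
  fun_induction numberToDigitsLsbGo n digs with
  | case1 n digs hpos ih =>
      intro h
      apply ih
      intro x hx
      rcases List.mem_append.1 hx with hx | hx
      · exact h x hx
      · rcases List.mem_singleton.1 hx with rfl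
        rw [PySem.Int.mod_eq_emod_of_pos (by norm_num : (0:Int) < 10)]
        omega
  | case2 n digs hpos => exact fun h => h

lemma digs_nonneg (n : Int) : ∀ x ∈ number_to_digits_lsb n, 0 ≤ x := by
  unfold number_to_digits_lsb
  split
  · intro x hx; rcases List.mem_singleton.1 hx with rfl; norm_num
  · exact digs_nonneg_go n [] (by simp)

lemma getD_nonneg (digs : List Int) (h : ∀ x ∈ digs, 0 ≤ x) (i : Nat) :
    0 ≤ digs.getD i 0 := by
  rcases lt_or_ge i digs.length with h' | h'
  · rw [List.getD_eq_getElem digs 0 h']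
    exact h _ (List.getElem_mem h')
  · rw [List.getD_eq_default digs 0 h']

lemma col_nonneg (digs : List Int) (h : ∀ x ∈ digs, 0 ≤ x) (i : Nat) :
    0 ≤ colOf digs i :=
  add_nonneg (getD_nonneg digs h i) (getD_nonneg digs h _)

lemma cSeq_nonneg (col : Nat → Int) (hcol : ∀ i, 0 ≤ col i) (k : Nat) :
    0 ≤ cSeq col k := by
  induction k with
  | zero => exact le_refl 0
  | succ k ih =>
      show 0 ≤ PySem.Int.floordiv (col k + cSeq col k) 10
      rw [PySem.Int.floordiv_eq_ediv_of_pos (by norm_num : (0:Int) < 10)]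
      exact Int.ediv_nonneg (add_nonneg (hcol k) ih) (by norm_num)

lemma rSeq_bounds (col : Nat → Int) (k : Nat) :
    0 ≤ rSeq col k ∧ rSeq col k < 10 := by
  unfold rSeq
  rw [PySem.Int.mod_eq_emod_of_pos (by norm_num : (0:Int) < 10)]
  omega

lemma rVal_bounds (col : Nat → Int) (k : Nat) :
    0 ≤ rVal col k ∧ rVal col k < 10 ^ k := by
  induction k with
  | zero => simp [rVal]
  | succ k ih =>
      have hr := rSeq_bounds col k
      have hp : (0:Int) < 10 ^ k := pow_pos (by norm_num) k
      have hpow : (10:Int) ^ (k + 1) = 10 * 10 ^ k := by ring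
      unfold rVal
      constructor
      · nlinarith [ih.1, hr.1]
      · nlinarith [ih.2, hr.2]

lemma acc_eq (col : Nat → Int) (k : Nat) :
    accSeq col k = rVal col k + cSeq col k * 10 ^ k := by
  induction k with
  | zero => simp [accSeq, rVal, cSeq]
  | succ k ih =>
      have hdm := PySem.Int.floordiv_mul_add_mod (col k + cSeq col k) 10
      show accSeq col k + col k * 10 ^ k =
        (rVal col k + rSeq col k * 10 ^ k) +
          PySem.Int.floordiv (col k + cSeq col k) 10 * 10 ^ (k + 1)
      rw [ih]
      unfold rSeq
      linear_combination (-(10:Int) ^ k) * hdm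
  
lemma acc_div_pow (col : Nat → Int) (k : Nat) :
    PySem.Int.floordiv (accSeq col (k + 1)) (10 ^ (k + 1)) = cSeq col (k + 1) := by
  have hb : (0:Int) < 10 ^ (k + 1) := pow_pos (by norm_num) _
  rw [PySem.Int.floordiv_eq_iff_of_pos hb]
  have hR := rVal_bounds col (k + 1)
  have hAcc := acc_eq col (k + 1)
  constructor
  · nlinarith [hR.1]
  · nlinarith [hR.2]

lemma acc_digit (col : Nat → Int) (k : Nat) :
    PySem.Int.mod (PySem.Int.floordiv (accSeq col (k + 1)) (10 ^ k)) 10 = rSeq col k := by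
  have hp : (0:Int) < 10 ^ k := pow_pos (by norm_num) k
  have hR := rVal_bounds col k
  have hr := rSeq_bounds col k
  have hpow : (10:Int) ^ (k + 1) = 10 * 10 ^ k := by ring
  have hAcc : accSeq col (k + 1) =
      rVal col k + rSeq col k * 10 ^ k + cSeq col (k + 1) * 10 ^ (k + 1) := by
    rw [acc_eq col (k + 1),
      show rVal col (k + 1) = rVal col k + rSeq col k * 10 ^ k from rfl]
  have hfd : PySem.Int.floordiv (accSeq col (k + 1)) (10 ^ k) =
      rSeq col k + 10 * cSeq col (k + 1) := by
    rw [hAcc, hpow, PySem.Int.floordiv_eq_iff_of_pos hp]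
    constructor
    · nlinarith [hR.1]
    · nlinarith [hR.2]
  rw [hfd, PySem.Int.mod_eq_emod_of_pos (by norm_num : (0:Int) < 10)]
  omega

lemma set_append_len {α : Type} (xs ys : List α) (v : α) :
    (xs ++ ys).set xs.length v = xs ++ ys.set 0 v := by
  induction xs with
  | nil => simp
  | cons a xs ih => simp [ih]

lemma getD_map_cSeq (col : Nat → Int) (m k : Nat) (hk : k < m) :
    ((List.range m).map (cSeq col)).getD k 0 = cSeq col k := by
  rw [List.getD_eq_getElem _ 0 (by simpa using hk)]
  simp

lemma foldA_char (digs : List Int) (k : Nat) (hk : k ≤ digs.length) :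
    (PySem.List.pyRange 0 (k : Int) 1).foldl (applyTStep digs digs.length)
      (List.replicate (digs.length + 1) 0, List.replicate (digs.length + 1) 0)
    = ((List.range k).map (rSeq (colOf digs)) ++ List.replicate (digs.length + 1 - k) 0,
       (List.range (k + 1)).map (cSeq (colOf digs)) ++ List.replicate (digs.length - k) 0) := by
  induction k with
  | zero =>
      rw [show ((0:Nat):Int) = 0 from rfl, PySem.List.pyRange_one_eq_nil (le_refl 0)]
      simp [List.replicate_succ, cSeq]
  | succ k ih =>
      have hk' : k < digs.length := hk
      have h0k : (0:Int) ≤ (k:Int) := by positivity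
      rw [show ((k+1:Nat):Int) = (k:Int) + 1 by push_cast; ring,
        PySem.List.pyRange_one_succ_right h0k, List.foldl_append, ih (le_of_lt hk')]
      simp only [List.foldl_cons, List.foldl_nil]
      simp only [applyTStep]
      have hj : (digs.length:Int) - 1 - (k:Int) = ((digs.length - 1 - k : Nat) : Int) := by
        omega
      have hgC : PySem.List.pyGetD
          ((List.range (k + 1)).map (cSeq (colOf digs)) ++
            List.replicate (digs.length - k) 0) (k:Int) 0 = cSeq (colOf digs) k := by
        rw [PySem.List.pyGetD_natCast, List.getD_append _ _ _ _ (by simp),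
          getD_map_cSeq _ _ _ (Nat.lt_succ_self k)]
      have hs : PySem.List.pyGetD digs (k:Int) 0 +
          PySem.List.pyGetD digs ((digs.length:Int) - 1 - (k:Int)) 0 +
          PySem.List.pyGetD
            ((List.range (k + 1)).map (cSeq (colOf digs)) ++
              List.replicate (digs.length - k) 0) (k:Int) 0
          = colOf digs k + cSeq (colOf digs) k := by
        rw [hj, hgC, PySem.List.pyGetD_natCast, PySem.List.pyGetD_natCast]
        rfl
      rw [hs]
      have hrep1 : List.replicate (digs.length + 1 - k) (0:Int) =
          0 :: List.replicate (digs.length - k) 0 := by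
        rw [show digs.length + 1 - k = (digs.length - k) + 1 by omega, List.replicate_succ]
      have hrep2 : List.replicate (digs.length - k) (0:Int) =
          0 :: List.replicate (digs.length - (k+1)) 0 := by
        rw [show digs.length - k = (digs.length - (k+1)) + 1 by omega, List.replicate_succ]
      rw [Prod.mk.injEq]
      constructor
      · -- res component
        rw [PySem.List.pySetD_natCast, hrep1]
        have hsa := set_append_len ((List.range k).map (rSeq (colOf digs)))
          (0 :: List.replicate (digs.length - k) 0)
          (PySem.Int.mod (colOf digs k + cSeq (colOf digs) k) 10)
        rw [show ((List.range k).map (rSeq (colOf digs))).length = k by simp] at hsa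
        rw [hsa, List.range_succ, List.map_append, List.map_singleton,
          show digs.length + 1 - (k + 1) = digs.length - k by omega]
        simp [rSeq]
      · -- carries component
        rw [show (k:Int) + 1 = ((k+1:Nat):Int) by push_cast; ring,
          PySem.List.pySetD_natCast, hrep2]
        have hsa := set_append_len ((List.range (k+1)).map (cSeq (colOf digs)))
          (0 :: List.replicate (digs.length - (k+1)) 0)
          (PySem.Int.floordiv (colOf digs k + cSeq (colOf digs) k) 10)
        rw [show ((List.range (k+1)).map (cSeq (colOf digs))).length = k + 1 by simp] at hsa
        rw [hsa, List.range_succ (n := k+1), List.map_append, List.map_singleton]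
        simp [cSeq]

lemma foldB_char (digs : List Int) (hnn : ∀ x ∈ digs, 0 ≤ x) (k : Nat)
    (hk : k ≤ digs.length) :
    (PySem.List.pyRange 0 (k : Int) 1).foldl (applyTAltStep digs digs.length)
      ([], [0], 0, 1)
    = ((List.range k).map (rSeq (colOf digs)),
       (List.range (k + 1)).map (cSeq (colOf digs)),
       accSeq (colOf digs) k, 10 ^ k) := by
  have hcol := col_nonneg digs hnn
  induction k with
  | zero =>
      rw [show ((0:Nat):Int) = 0 from rfl, PySem.List.pyRange_one_eq_nil (le_refl 0)]
      simp [accSeq, cSeq]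
  | succ k ih =>
      have hk' : k < digs.length := hk
      have h0k : (0:Int) ≤ (k:Int) := by positivity
      rw [show ((k+1:Nat):Int) = (k:Int) + 1 by push_cast; ring,
        PySem.List.pyRange_one_succ_right h0k, List.foldl_append, ih (le_of_lt hk')]
      simp only [List.foldl_cons, List.foldl_nil]
      simp only [applyTAltStep]
      have hj : (digs.length:Int) - 1 - (k:Int) = ((digs.length - 1 - k : Nat) : Int) := by
        omega
      have hacc : accSeq (colOf digs) k +
          (PySem.List.pyGetD digs (k:Int) 0 +
           PySem.List.pyGetD digs ((digs.length:Int) - 1 - (k:Int)) 0) * 10 ^ k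
          = accSeq (colOf digs) (k + 1) := by
        rw [hj, PySem.List.pyGetD_natCast, PySem.List.pyGetD_natCast]
        rfl
      rw [hacc]
      have hp10 : PySem.Int.floordiv ((10:Int) ^ k * 10) 10 = 10 ^ k := by
        rw [PySem.Int.floordiv_eq_ediv_of_pos (by norm_num : (0:Int) < 10)]
        exact Int.mul_ediv_cancel _ (by norm_num)
      have hpow : (10:Int) ^ k * 10 = 10 ^ (k + 1) := by ring
      rw [hp10, hpow, acc_digit (colOf digs) k, acc_div_pow (colOf digs) k]
      simp only [Prod.mk.injEq, and_true]
      refine ⟨?_, ?_⟩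
      · simp [List.range_succ]
      · simp [List.range_succ (n := k+1)]

lemma dtn_foldr (xs : List Int) :
    digits_to_number xs = xs.foldr (fun dd v => v * 10 + dd) 0 := by
  simp [digits_to_number, List.foldl_reverse]

lemma foldr_horner (xs : List Int) (b : Int) :
    xs.foldr (fun dd v => v * 10 + dd) b =
      xs.foldr (fun dd v => v * 10 + dd) 0 + b * 10 ^ xs.length := by
  induction xs with
  | nil => simp
  | cons a xs ih => simp [ih]; ring

lemma dtn_append (xs : List Int) (c : Int) :
    digits_to_number (xs ++ [c]) = digits_to_number xs + c * 10 ^ xs.length := by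
  rw [dtn_foldr, dtn_foldr, List.foldr_append]
  simp only [List.foldr_cons, List.foldr_nil, zero_mul, zero_add]
  rw [foldr_horner]

lemma dtn_map_rSeq (col : Nat → Int) (k : Nat) :
    digits_to_number ((List.range k).map (rSeq col)) = rVal col k := by
  induction k with
  | zero => simp [rVal, digits_to_number]
  | succ k ih =>
      rw [List.range_succ, List.map_append, List.map_singleton, dtn_append, ih]
      simp [rVal]

theorem apply_T_spec : Claim_equal_apply_T := by
  intro n _
  simp only [Spec_apply_T, apply_T, apply_T_alt]
  have hnn : ∀ x ∈ number_to_digits_lsb n, 0 ≤ x := digs_nonneg n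
  rw [foldA_char (number_to_digits_lsb n) (number_to_digits_lsb n).length (le_refl _),
    foldB_char (number_to_digits_lsb n) hnn (number_to_digits_lsb n).length (le_refl _)]
  set digs := number_to_digits_lsb n with hdigs
  set d := digs.length with hd
  set col := colOf digs with hcoldef
  have hcol := col_nonneg digs hnn
  have hrep1 : List.replicate (d + 1 - d) (0:Int) = [0] := by
    rw [show d + 1 - d = 1 by omega]; rfl
  have hrep0 : List.replicate (d - d) (0:Int) = [] := by
    rw [show d - d = 0 by omega]; rfl
  rw [hrep1, hrep0, List.append_nil]
  have hcd : PySem.List.pyGetD ((List.range (d + 1)).map (cSeq col)) (d:Int) 0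
      = cSeq col d := by
    rw [PySem.List.pyGetD_natCast, getD_map_cSeq _ _ _ (Nat.lt_succ_self d)]
  have hlast : PySem.List.pyGetD ((List.range (d + 1)).map (cSeq col)) (-1) 0
      = cSeq col d := by
    rw [List.range_succ, List.map_append, List.map_singleton,
      PySem.List.pyGetD_neg_one_append_singleton]
  rw [hcd, hlast]
  by_cases hpos : cSeq col d > 0
  · rw [if_pos hpos, if_pos hpos]
    have hset : PySem.List.pySetD ((List.range d).map (rSeq col) ++ [0]) (d:Int)
        (cSeq col d) = (List.range d).map (rSeq col) ++ [cSeq col d] := by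
      have hsa := set_append_len ((List.range d).map (rSeq col)) [(0:Int)] (cSeq col d)
      rw [show ((List.range d).map (rSeq col)).length = d by simp] at hsa
      rw [PySem.List.pySetD_natCast, hsa]
      rfl
    have hslice : PySem.List.slice ((List.range d).map (rSeq col) ++ [cSeq col d])
        none (some ((d:Int) + 1)) = (List.range d).map (rSeq col) ++ [cSeq col d] := by
      rw [show (d:Int) + 1 = ((d+1:Nat):Int) by push_cast; ring,
        PySem.List.slice_to_natCast]
      exact List.take_of_length_le (by simp)
    simp only [hset, hslice, Prod.mk.injEq, and_true]
    rw [dtn_append, dtn_map_rSeq, show ((List.range d).map (rSeq col)).length = d by simp,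
      acc_eq col d]
  · rw [if_neg hpos, if_neg hpos]
    have hc0 : cSeq col d = 0 := le_antisymm (by omega) (cSeq_nonneg col hcol d)
    have hslice : PySem.List.slice ((List.range d).map (rSeq col) ++ [0])
        none (some (d:Int)) = (List.range d).map (rSeq col) := by
      rw [PySem.List.slice_to_natCast]
      exact List.take_left' (by simp)
    simp only [hslice, Prod.mk.injEq, and_true]
    rw [dtn_map_rSeq, acc_eq col d, hc0]
    ring
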